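-- pv_equiv track=rewrite | github.com/florenciarouco/tallerDeGit | comisionC.py | tiempo_mas_rapido
-- ===== SOURCE A (Python) =====
-- from typing import List
--
-- def tiempo_mas_rapido (tiempos_salas:List[int]) -> int:
--     res:int = 0
--     minimo_actual = tiempos_salas[0]
--     for i in range(len(tiempos_salas)):
--         segundo = tiempos_salas[i]
--         if segundo > 0 and segundo < minimo_actual:
--             minimo_actual = segundo
--             res = i
--     return res
-- ===== SOURCE B (Python) =====
-- from typing import List
--
-- def tiempo_mas_rapido(tiempos_salas: List[int]) -> int:
--     M = tiempos_salas[0]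
--     positivos = [x for x in tiempos_salas if x > 0]
--     if positivos and min(positivos) < M:
--         M = min(positivos)
--     return tiempos_salas.index(M)
-- ===== Notes on version B (the rewrite author's own statement) =====
-- stated objective: alternative
-- what changed: Replaces A's single-pass running argmin (index+value accumulator updated in a loop) by a value-then-locate decomposition: compute the target value M (the minimum positive if it beats the first element, else the first element) with filter/min, then return list.index(M).
import Mathlib
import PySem

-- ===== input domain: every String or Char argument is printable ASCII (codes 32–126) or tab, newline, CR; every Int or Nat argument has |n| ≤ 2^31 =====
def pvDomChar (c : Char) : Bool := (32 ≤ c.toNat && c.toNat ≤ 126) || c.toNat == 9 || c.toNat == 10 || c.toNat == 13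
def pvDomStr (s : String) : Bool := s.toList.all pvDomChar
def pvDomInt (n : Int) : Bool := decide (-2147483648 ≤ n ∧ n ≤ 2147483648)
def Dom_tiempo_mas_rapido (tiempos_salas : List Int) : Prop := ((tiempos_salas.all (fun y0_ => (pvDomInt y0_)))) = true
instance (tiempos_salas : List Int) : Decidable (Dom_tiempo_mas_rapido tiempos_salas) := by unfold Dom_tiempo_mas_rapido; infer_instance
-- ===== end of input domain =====

-- B replaces A's running argmin loop by compute-the-target-value-then-locate-it (filter/min + index); equivalence on nonempty lists (A raises IndexError on []).


-- ===== PORT A =====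
def tiempo_mas_rapido (tiempos_salas : List Int) : Int :=
  match PySem.List.pyGet? tiempos_salas 0 with
  | none => 0  -- unreachable under Pre_: empty list, Python raises IndexError
  | some minimo0 =>
    (((PySem.List.pyRange 0 (tiempos_salas.length : Int) 1).foldl
        (fun (st : Int × Int) i =>
          let segundo := PySem.List.pyGetD tiempos_salas i 0
          if segundo > 0 ∧ segundo < st.2 then (i, segundo) else st)
        (0, minimo0))).1

-- ===== PORT B =====
def tiempo_mas_rapido_alt (tiempos_salas : List Int) : Int :=
  match PySem.List.pyGet? tiempos_salas 0 with
  | none => 0  -- unreachable under Pre_: empty list, Python raises IndexError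
  | some m0 =>
    let positivos := tiempos_salas.filter (fun x => decide (x > 0))
    let M : Int :=
      match PySem.List.min? positivos (fun x => x) with
      | none => m0
      | some p => if p < m0 then p else m0
    match PySem.List.index? tiempos_salas M with
    | some k => (k : Int)
    | none => 0  -- unreachable: M is an element of the list

-- ===== PRECONDITION & SPEC =====
-- Pre_ excludes exactly the empty list, on which A raises IndexError (tiempos_salas[0]).
def Pre_tiempo_mas_rapido (tiempos_salas : List Int) : Prop := tiempos_salas ≠ []
instance (tiempos_salas : List Int) : Decidable (Pre_tiempo_mas_rapido tiempos_salas) := by unfold Pre_tiempo_mas_rapido; infer_instance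
def pvWitness_tiempo_mas_rapido : List Int := ([3, -1, 2, 2, 5])
def Spec_tiempo_mas_rapido (tiempos_salas : List Int) (out : Int) : Prop := out = tiempo_mas_rapido_alt tiempos_salas
instance (tiempos_salas : List Int) (out : Int) : Decidable (Spec_tiempo_mas_rapido tiempos_salas out) := by unfold Spec_tiempo_mas_rapido; infer_instance

-- ===== CLAIM (what is proved, stated in full; the proofs are below) =====
def Claim_equal_tiempo_mas_rapido : Prop := ∀ (tiempos_salas : List Int), Dom_tiempo_mas_rapido tiempos_salas → Pre_tiempo_mas_rapido tiempos_salas → Spec_tiempo_mas_rapido tiempos_salas (tiempo_mas_rapido tiempos_salas)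

-- ===== LEMMAS AND PROOFS =====

-- A's loop body, on an (index, element) pair
def pvStepA (st : Int × Int) (p : Int × Int) : Int × Int :=
  if p.2 > 0 ∧ p.2 < st.2 then (p.1, p.2) else st

theorem pv_foldl_min_comm (l : List Int) (a b : Int) :
    l.foldl min (min a b) = min a (l.foldl min b) := by
  induction l generalizing b with
  | nil => simp
  | cons x xs ih => simp only [List.foldl_cons, min_assoc, ih]

theorem pv_index?_of_mem (l : List Int) (v : Int) (h : v ∈ l) :
    PySem.List.index? l v = some (l.idxOf v) := by
  induction l with
  | nil => simp at h
  | cons x xs ih =>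
    by_cases hx : x = v
    · subst hx
      rw [PySem.List.index?_cons_self]
      simp [List.idxOf_cons_self]
    · rw [PySem.List.index?_cons_of_ne (h := hx), List.idxOf_cons_ne _ (by exact hx)]
      rcases List.mem_cons.mp h with rfl | hm
      · exact absurd rfl hx
      · rw [ih hm]; rfl

-- characterization of A's fold over enumerate: it returns the first index of the
-- minimum positive when that beats the seed m, and the initial state otherwise
theorem pv_fold_char (l : List Int) (s r m : Int) :
    (PySem.List.enumerate l s).foldl pvStepA (r, m) =
      (match PySem.List.min? (l.filter (fun x => decide (x > 0))) (fun x => x) with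
       | none => (r, m)
       | some p => if p < m then (s + (l.idxOf p : Int), p) else (r, m)) := by
  induction l generalizing s r m with
  | nil => simp [PySem.List.enumerate, PySem.List.min?]
  | cons x xs ih =>
    rw [PySem.List.enumerate_cons, List.foldl_cons]
    by_cases hx : 0 < x
    · simp only [List.filter_cons, hx, decide_true, if_true]
      by_cases hxm : x < m
      · have hstep : pvStepA (r, m) (s, x) = (s, x) := by
          simp [pvStepA, hx, hxm]
        rw [hstep, ih]
        rcases hPx : xs.filter (fun x => decide (x > 0)) with _ | ⟨p0, ps⟩
        · simp [PySem.List.min?, hxm, List.idxOf_cons_self]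
        · simp only [PySem.List.min?_id_cons, List.foldl_cons]
          rw [pv_foldl_min_comm]
          set q := ps.foldl min p0 with hq
          by_cases hqx : q < x
          · have hne : x ≠ q := by omega
            have hqm2 : q < m := by omega
            simp only [min_eq_right (le_of_lt hqx), hqm2, if_true, hqx, if_true,
              List.idxOf_cons_ne _ hne, Prod.mk.injEq]
            exact ⟨by push_cast; ring, trivial⟩
          · have hqm2 : x < m := hxm
            simp [min_eq_left (by omega : x ≤ q), hxm, hqx, List.idxOf_cons_self]
      · have hstep : pvStepA (r, m) (s, x) = (r, m) := by
          simp [pvStepA, hxm]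
        rw [hstep, ih]
        rcases hPx : xs.filter (fun x => decide (x > 0)) with _ | ⟨p0, ps⟩
        · simp [PySem.List.min?, hxm]
        · simp only [PySem.List.min?_id_cons, List.foldl_cons]
          rw [pv_foldl_min_comm]
          set q := ps.foldl min p0 with hq
          by_cases hqm : q < m
          · have hqx : q < x := by omega
            have hne : x ≠ q := by omega
            simp only [min_eq_right (le_of_lt hqx), hqm, if_true,
              List.idxOf_cons_ne _ hne, Prod.mk.injEq]
            exact ⟨by push_cast; ring, trivial⟩
          · have hnm : ¬ min x q < m := by omega
            simp [hnm, hqm]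
    · have hstep : pvStepA (r, m) (s, x) = (r, m) := by
        simp [pvStepA]; omega
      rw [hstep, ih]
      simp only [List.filter_cons, hx, decide_false, Bool.false_eq_true, if_false]
      rcases hPx : xs.filter (fun x => decide (x > 0)) with _ | ⟨p0, ps⟩
      · rfl
      · simp only [PySem.List.min?_id_cons]
        set q := ps.foldl min p0 with hq
        by_cases hqm : q < m
        · have hqmem : q ∈ xs.filter (fun x => decide (x > 0)) := by
            exact PySem.List.min?_mem (by rw [hPx, PySem.List.min?_id_cons])
          have hqpos : 0 < q := by
            have := List.of_mem_filter hqmem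
            simpa using this
          have hne : x ≠ q := by omega
          simp only [hqm, if_true, List.idxOf_cons_ne _ hne, Prod.mk.injEq]
          exact ⟨by push_cast; ring, trivial⟩
        · simp only [hqm, if_false]

theorem tiempo_mas_rapido_spec : Claim_equal_tiempo_mas_rapido := by
  intro t _ hpre
  unfold Spec_tiempo_mas_rapido
  rcases t with _ | ⟨h, tl⟩
  · exact absurd rfl hpre
  have hget : PySem.List.pyGet? (h :: tl) 0 = some h := by
    simp [PySem.List.pyGet?, PySem.List.pyIdx?]
  have hA : tiempo_mas_rapido (h :: tl) =
      ((PySem.List.enumerate (h :: tl) 0).foldl pvStepA (0, h)).1 := by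
    unfold tiempo_mas_rapido
    rw [hget]
    rw [PySem.List.enumerate_eq_map_pyRange (xs := h :: tl) (d := 0), List.foldl_map]
    rfl
  rw [hA, pv_fold_char]
  unfold tiempo_mas_rapido_alt
  rw [hget]
  dsimp only
  rcases hP : (h :: tl).filter (fun x => decide (x > 0)) with _ | ⟨p0, ps⟩
  · -- no positive element: A keeps (0, h); B locates h at index 0
    rw [show PySem.List.min? ([] : List Int) (fun x => x) = none from rfl]
    rw [pv_index?_of_mem (h :: tl) h (List.mem_cons_self ..)]
    simp [List.idxOf_cons_self]
  · simp only [PySem.List.min?_id_cons]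
    set q := ps.foldl min p0 with hq
    have hqmem : q ∈ h :: tl := by
      refine List.mem_of_mem_filter (p := fun x => decide (x > 0)) ?_
      rw [hP]
      exact PySem.List.min?_mem (m := q) (PySem.List.min?_id_cons ..)
    by_cases hqh : q < h
    · simp only [hqh, if_true]
      rw [pv_index?_of_mem (h :: tl) q hqmem]
      push_cast; ring
    · simp only [hqh, if_false]
      rw [pv_index?_of_mem (h :: tl) h (List.mem_cons_self ..)]
      simp [List.idxOf_cons_self]
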